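-- pv_equiv track=rewrite | github.com/olajio/delete_duplicate_data_views | delete_duplicate_data_view.py | find_duplicated_data_views
-- ===== SOURCE A (Python) =====
-- from collections import defaultdict
--
-- def find_duplicated_data_views(data_views):
--     title_to_ids = defaultdict(list)
--     for data_view in data_views:
--         title = data_view["title"]
--         id = data_view["id"]
--         title_to_ids[title].append(id)
--     duplicates = {title: ids for title, ids in title_to_ids.items() if len(ids) > 1}
--     return duplicates
-- ===== SOURCE B (Python) =====
-- def find_duplicated_data_views(data_views):
--     titles = list(dict.fromkeys(dv["title"] for dv in data_views))
--     duplicates = {}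
--     for title in titles:
--         ids = [dv["id"] for dv in data_views if dv["title"] == title]
--         if len(ids) > 1:
--             duplicates[title] = ids
--     return duplicates
-- ===== Notes on version B (the rewrite author's own statement) =====
-- stated objective: alternative
-- what changed: A accumulates every id under its title in one defaultdict pass and then filters the finished groups; B never builds a grouping map: it deduplicates the titles in first-occurrence order and, for each distinct title, re-scans data_views to collect that title's ids, keeping the title only if it collected more than one id.
import Mathlib
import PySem

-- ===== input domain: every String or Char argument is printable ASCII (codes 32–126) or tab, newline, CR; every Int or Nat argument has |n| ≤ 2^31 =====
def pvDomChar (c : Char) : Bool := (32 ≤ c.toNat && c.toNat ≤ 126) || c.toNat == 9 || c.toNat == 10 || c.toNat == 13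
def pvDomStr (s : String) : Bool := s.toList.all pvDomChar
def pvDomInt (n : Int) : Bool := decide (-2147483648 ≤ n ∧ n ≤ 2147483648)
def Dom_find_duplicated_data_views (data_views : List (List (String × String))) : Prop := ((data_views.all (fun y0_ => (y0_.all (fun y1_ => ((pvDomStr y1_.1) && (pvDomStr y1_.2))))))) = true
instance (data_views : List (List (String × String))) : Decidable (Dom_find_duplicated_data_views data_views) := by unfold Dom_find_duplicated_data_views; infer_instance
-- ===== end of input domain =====

-- B replaces A's group-everything-in-a-defaultdict-then-filter pass by deduplicating the titles
-- and re-scanning data_views once per distinct title (objective: alternative algorithm, no grouping map).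

-- ===== PORT A =====
-- dv["title"] / dv["id"] raise KeyError on a missing key; Pre_ below excludes those inputs,
-- so the getD default "" is never reached on admitted inputs.
def find_duplicated_data_views (data_views : List (List (String × String))) : List (String × List String) :=
  let title_to_ids : PySem.Dict String (List String) :=
    data_views.foldl (fun d data_view =>
      let title := (PySem.Dict.mk data_view).getD "title" ""
      let id := (PySem.Dict.mk data_view).getD "id" ""
      d.modify title [] (fun ids => ids ++ [id])) PySem.Dict.empty
  (title_to_ids.items.filter (fun p => decide (1 < p.2.length)))

-- ===== PORT B =====
def find_duplicated_data_views_alt (data_views : List (List (String × String))) : List (String × List String) :=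
  let titles : PySem.Set String :=
    PySem.Set.ofList (data_views.map (fun dv => (PySem.Dict.mk dv).getD "title" ""))
  let duplicates : PySem.Dict String (List String) :=
    titles.foldl (fun res title =>
      let ids := ((data_views.filter (fun dv => (PySem.Dict.mk dv).getD "title" "" == title)).map
        (fun dv => (PySem.Dict.mk dv).getD "id" ""))
      if 1 < ids.length then res.insert title ids else res) PySem.Dict.empty
  duplicates.items

-- ===== PRECONDITION & SPEC =====
-- Pre_ excludes exactly the inputs where A raises KeyError: some data_view lacks a "title" or "id" key.
def Pre_find_duplicated_data_views (data_views : List (List (String × String))) : Prop :=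
  ∀ dv ∈ data_views, "title" ∈ dv.map Prod.fst ∧ "id" ∈ dv.map Prod.fst
instance (data_views : List (List (String × String))) : Decidable (Pre_find_duplicated_data_views data_views) := by unfold Pre_find_duplicated_data_views; infer_instance
def pvWitness_find_duplicated_data_views : (List (List (String × String))) :=
  [[("title", "t"), ("id", "1")], [("title", "t"), ("id", "2")], [("title", "u"), ("id", "3")]]
def Spec_find_duplicated_data_views (data_views : List (List (String × String))) (out : List (String × List String)) : Prop := out = find_duplicated_data_views_alt data_views
instance (data_views : List (List (String × String))) (out : List (String × List String)) : Decidable (Spec_find_duplicated_data_views data_views out) := by unfold Spec_find_duplicated_data_views; infer_instance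

-- ===== CLAIM (what is proved, stated in full; the proofs are below) =====
def Claim_equal_find_duplicated_data_views : Prop := ∀ (data_views : List (List (String × String))), Dom_find_duplicated_data_views data_views → Pre_find_duplicated_data_views data_views → Spec_find_duplicated_data_views data_views (find_duplicated_data_views data_views)

-- ===== LEMMAS AND PROOFS =====

-- A's grouping step and loop, over the extracted (title, id) pairs
def pvStep (d : PySem.Dict String (List String)) (p : String × String) : PySem.Dict String (List String) :=
  d.modify p.1 [] (fun ids => ids ++ [p.2])

def pvG (ps : List (String × String)) : PySem.Dict String (List String) :=
  ps.foldl pvStep PySem.Dict.empty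

def pvPairs (dvs : List (List (String × String))) : List (String × String) :=
  dvs.map (fun dv => ((PySem.Dict.mk dv).getD "title" "", (PySem.Dict.mk dv).getD "id" ""))

lemma pvA_eq (dvs : List (List (String × String))) :
    find_duplicated_data_views dvs
      = (pvG (pvPairs dvs)).items.filter (fun q => decide (1 < q.2.length)) := by
  simp [find_duplicated_data_views, pvG, pvPairs, pvStep, List.foldl_map]

-- A's grouping loop keeps each distinct title once, in first-occurrence order
lemma pvG_keys (ps : List (String × String)) :
    (pvG ps).keys = PySem.Set.ofList (ps.map Prod.fst) := by
  rw [pvG, show pvStep = (fun d p => d.modify (Prod.fst p) [] ((fun _ p ids => ids ++ [p.2]) d p)) from rfl,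
    PySem.Dict.keys_foldl_modify_key, PySem.Dict.keys_empty, PySem.Set.update_nil_left]

lemma pvG_items (ps : List (String × String)) :
    (pvG ps).items
      = (PySem.Set.ofList (ps.map Prod.fst)).map
          (fun k => (k, (ps.filter (fun p => p.1 == k)).map Prod.snd)) := by
  have hnd : (pvG ps).keys.Nodup := by
    rw [pvG_keys]; exact PySem.Set.nodup_ofList _
  rw [PySem.Dict.items_eq_map_keys _ hnd [], pvG_keys]
  refine List.map_congr_left (fun k _ => ?_)
  rw [pvG, show pvStep = (fun (d : PySem.Dict String (List String)) (p : String × String) => d.modify p.1 [] (fun x => x ++ [p.2])) from rfl,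
    PySem.Dict.getD_foldl_modify_append, PySem.Dict.getD_empty]
  simp

-- B's loop over fresh distinct keys, inserting only when the guard holds, appends the guarded items
lemma pvItems_foldl_if (f : String → List String) (P : String → Prop) [DecidablePred P] :
    ∀ (l : List String) (d : PySem.Dict String (List String)), l.Nodup →
      (∀ a ∈ l, d.contains a = false) →
      (l.foldl (fun d k => if P k then d.insert k (f k) else d) d).items
        = d.items ++ (l.filter (fun k => decide (P k))).map (fun k => (k, f k)) := by
  intro l
  induction l with
  | nil => intro d _ _; simp
  | cons k rest ih =>
    intro d hnd hfresh
    have hkrest : k ∉ rest := (List.nodup_cons.mp hnd).1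
    have hndr : rest.Nodup := (List.nodup_cons.mp hnd).2
    rw [List.foldl_cons, List.filter_cons]
    by_cases hP : P k
    · rw [if_pos hP, show (decide (P k)) = true from decide_eq_true hP]
      have hfresh' : ∀ a ∈ rest, (d.insert k (f k)).contains a = false := by
        intro a ha
        rw [PySem.Dict.contains_insert]
        have hak : (a == k) = false := by
          simp [beq_eq_false_iff_ne]; rintro rfl; exact hkrest ha
        simp [hak, hfresh a (List.mem_cons_of_mem _ ha)]
      rw [ih (d.insert k (f k)) hndr hfresh',
        PySem.Dict.items_insert_of_not_contains _ _ (hfresh k (List.mem_cons_self))]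
      simp
    · rw [if_neg hP, show (decide (P k)) = false from decide_eq_false hP]
      exact ih d hndr (fun a ha => hfresh a (List.mem_cons_of_mem _ ha))

lemma pvB_eq (dvs : List (List (String × String))) :
    find_duplicated_data_views_alt dvs
      = (((PySem.Set.ofList ((pvPairs dvs).map Prod.fst)).filter
            (fun k => decide (1 < (((pvPairs dvs).filter (fun p => p.1 == k)).map Prod.snd).length))).map
          (fun k => (k, ((pvPairs dvs).filter (fun p => p.1 == k)).map Prod.snd))) := by
  have h := pvItems_foldl_if
    (fun k => ((dvs.filter (fun dv => (PySem.Dict.mk dv).getD "title" "" == k)).map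
        (fun dv => (PySem.Dict.mk dv).getD "id" "")))
    (fun k => 1 < ((dvs.filter (fun dv => (PySem.Dict.mk dv).getD "title" "" == k)).map
        (fun dv => (PySem.Dict.mk dv).getD "id" "")).length)
    (PySem.Set.ofList (dvs.map (fun dv => (PySem.Dict.mk dv).getD "title" "")))
    PySem.Dict.empty (PySem.Set.nodup_ofList _) (by intro a _; exact PySem.Dict.contains_empty a)
  beta_reduce at h
  simp only [find_duplicated_data_views_alt]
  rw [h]
  simp [pvPairs, List.filter_map, List.map_map, Function.comp_def, PySem.Dict.empty]

-- ===== VERDICT (by name: the statement is the Claim_ definition above) =====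
theorem find_duplicated_data_views_spec : Claim_equal_find_duplicated_data_views := by
  intro dvs _ _
  unfold Spec_find_duplicated_data_views
  rw [pvA_eq, pvB_eq, pvG_items, List.filter_map]
  rfl
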